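-- pv_equiv track=rewrite | github.com/ParkInoh/Python-Elegance-Measure | server/public/4289.py | width_check
-- ===== SOURCE A (Python) =====
-- def width_check(mymatrix, n):
--     bingo_list=[0,0]
--     for w in range(n) :
--          count=0
--          count_list=[]
--          for i in range(n) :
--               if   mymatrix[i][w] == "0" :
--                 count_list.append(count)
--                 count  = 0
--               elif mymatrix[i][w] == "1" :
--                 count += 1
--
--          for k in range(len(count_list)):
--               if   count_list[k] == bingo_list[0] :
--                  bingo_list[1] += 1
--               elif count_list[k] > bingo_list[0]  :
--                  bingo_list[1] = 1
--                  bingo_list[0] = count_list[k]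
--               else :
--                   pass
--     return(bingo_list)
-- ===== SOURCE B (Python) =====
-- def width_check(mymatrix, n):
--     runs = []
--     for w in range(n):
--         col = [mymatrix[i][w] for i in range(n)]
--         # split the column at each "0": one finished run per "0" (trailing run dropped, as in A)
--         while "0" in col:
--             z = col.index("0")
--             runs.append(col[:z].count("1"))
--             col = col[z + 1:]
--     if not runs:
--         return [0, 0]
--     m = max(runs)
--     return [m, runs.count(m)]
-- ===== Notes on version B (the rewrite author's own statement) =====
-- stated objective: alternative
-- what changed: B replaces A's stateful per-cell counter with repeated split-at-first-"0" segment counting per column, and replaces A's online running-max/tie loop over each column's run list with one batch max/count over the flat list of all runs.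
import Mathlib
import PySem

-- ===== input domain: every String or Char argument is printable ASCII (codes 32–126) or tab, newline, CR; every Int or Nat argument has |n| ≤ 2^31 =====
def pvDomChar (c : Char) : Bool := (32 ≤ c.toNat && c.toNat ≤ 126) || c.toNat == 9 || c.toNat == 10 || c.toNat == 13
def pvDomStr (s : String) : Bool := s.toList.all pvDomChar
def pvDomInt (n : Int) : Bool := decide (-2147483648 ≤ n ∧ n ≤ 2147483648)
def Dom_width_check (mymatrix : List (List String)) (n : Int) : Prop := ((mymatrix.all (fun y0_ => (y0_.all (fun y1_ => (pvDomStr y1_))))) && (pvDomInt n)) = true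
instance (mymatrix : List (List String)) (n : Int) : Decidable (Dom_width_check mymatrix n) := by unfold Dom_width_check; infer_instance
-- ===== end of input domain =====

-- B splits each column at its "0" cells and batch-aggregates max/count over the flat list of all runs,
-- instead of A's per-cell counter and online running-max/tie state; same cost, different decomposition.

-- ===== PORT A =====
-- body of A's inner loop: 'if cell == "0": append count; count = 0  elif cell == "1": count += 1'
def stepA (s : Int × List Int) (x : String) : Int × List Int :=
  if x = "0" then (0, s.2 ++ [s.1]) else if x = "1" then (s.1 + 1, s.2) else s

-- body of A's third loop over count_list, updating bingo_list = (b.1, b.2)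
def stepO (b : Int × Int) (v : Int) : Int × Int :=
  if v = b.1 then (b.1, b.2 + 1) else if v > b.1 then (v, 1) else b

-- mymatrix[i][w]: Pre_ ensures both indexings are in range, so pyGetD's default is never used
def width_check (mymatrix : List (List String)) (n : Int) : List Int :=
  let bingo :=
    (PySem.List.pyRange 0 n 1).foldl (fun (bingo : Int × Int) w =>
      let cl :=
        (PySem.List.pyRange 0 n 1).foldl
          (fun (s : Int × List Int) i =>
            stepA s (PySem.List.pyGetD (PySem.List.pyGetD mymatrix i []) w "")) (0, [])
      (PySem.List.pyRange 0 (cl.2.length : Int) 1).foldl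
        (fun (b : Int × Int) k => stepO b (PySem.List.pyGetD cl.2 k 0)) bingo) (0, 0)
  [bingo.1, bingo.2]

-- ===== PORT B =====
-- 'while "0" in col: z = col.index("0"); runs.append(col[:z].count("1")); col = col[z+1:]'
def altColRuns (col : List String) : List Int :=
  match h : PySem.List.index? col "0" with
  | none => []
  | some z =>
      ((PySem.List.slice col none (some (z : Int))).count "1" : Int) ::
        altColRuns (PySem.List.slice col (some ((z : Int) + 1)) none)
termination_by col.length
decreasing_by
  obtain ⟨hk, -, -⟩ := PySem.List.getElem_of_index?_eq_some h
  have heq : PySem.List.slice col (some ((z : Int) + 1)) none = col.drop (z + 1) := by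
    have hc : ((z : Int) + 1) = ((z + 1 : Nat) : Int) := by push_cast; ring
    rw [hc, PySem.List.slice_from_natCast]
  rw [heq]
  simp only [List.length_drop]
  omega

def width_check_alt (mymatrix : List (List String)) (n : Int) : List Int :=
  let runs :=
    (PySem.List.pyRange 0 n 1).foldl (fun (acc : List Int) w =>
      let col := (PySem.List.pyRange 0 n 1).map
        (fun i => PySem.List.pyGetD (PySem.List.pyGetD mymatrix i []) w "")
      acc ++ altColRuns col) []
  match PySem.List.max? runs (fun x => x) with
  | none => [0, 0]
  | some m => [m, (runs.count m : Int)]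

-- ===== PRECONDITION & SPEC =====
-- Pre_ excludes exactly the inputs where A raises IndexError: A reads mymatrix[i][w] for all 0 ≤ i, w < n.
def Pre_width_check (mymatrix : List (List String)) (n : Int) : Prop :=
  n ≤ (mymatrix.length : Int) ∧ ∀ row ∈ mymatrix.take n.toNat, n ≤ (row.length : Int)
instance (mymatrix : List (List String)) (n : Int) : Decidable (Pre_width_check mymatrix n) := by
  unfold Pre_width_check; infer_instance

def pvWitness_width_check : List (List String) × Int := ([["1", "0"], ["1", "1"]], 2)

def Spec_width_check (mymatrix : List (List String)) (n : Int) (out : List Int) : Prop := out = width_check_alt mymatrix n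
instance (mymatrix : List (List String)) (n : Int) (out : List Int) : Decidable (Spec_width_check mymatrix n out) := by unfold Spec_width_check; infer_instance

-- ===== CLAIM (what is proved, stated in full; the proofs are below) =====
def Claim_equal_width_check : Prop := ∀ (mymatrix : List (List String)) (n : Int), Dom_width_check mymatrix n → Pre_width_check mymatrix n → Spec_width_check mymatrix n (width_check mymatrix n)

-- ===== LEMMAS AND PROOFS =====

-- the column as a list (B builds it explicitly; A's index loop folds over the same values)
def colL (mymatrix : List (List String)) (n w : Int) : List String :=
  (PySem.List.pyRange 0 n 1).map (fun i => PySem.List.pyGetD (PySem.List.pyGetD mymatrix i []) w "")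

-- reference run extraction: what A's counter loop appends for one column
def crun (c : Int) : List String → List Int
  | [] => []
  | x :: t => if x = "0" then c :: crun 0 t else crun (if x = "1" then c + 1 else c) t

theorem foldl_stepA_snd (col : List String) (c : Int) (acc : List Int) :
    (col.foldl stepA (c, acc)).2 = acc ++ crun c col := by
  induction col generalizing c acc with
  | nil => simp [crun]
  | cons x t ih =>
      simp only [List.foldl_cons, stepA, crun]
      split_ifs with h1 h2 <;> simp [ih]

theorem crun_nonneg (col : List String) (c : Int) (hc : 0 ≤ c) :
    ∀ x ∈ crun c col, 0 ≤ x := by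
  induction col generalizing c with
  | nil => simp [crun]
  | cons y t ih =>
      intro x hx
      by_cases h0 : y = "0"
      · simp only [crun, if_pos h0, List.mem_cons] at hx
        rcases hx with rfl | hx
        · exact hc
        · exact ih 0 le_rfl x hx
      · simp only [crun, if_neg h0] at hx
        by_cases h1 : y = "1"
        · rw [if_pos h1] at hx
          exact ih _ (by omega) x hx
        · rw [if_neg h1] at hx
          exact ih _ hc x hx

theorem crun_of_not_mem (col : List String) (h : "0" ∉ col) (c : Int) : crun c col = [] := by
  induction col generalizing c with
  | nil => rfl
  | cons y t ih =>
      simp only [List.mem_cons, not_or] at h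
      have h0 : y ≠ "0" := fun hy => h.1 hy.symm
      simp [crun, h0, ih h.2]

theorem crun_append (suf : List String) :
    ∀ (pre : List String) (c : Int), "0" ∉ pre →
      crun c (pre ++ "0" :: suf) = (c + (pre.count "1" : Int)) :: crun 0 suf := by
  intro pre
  induction pre with
  | nil => intro c _; simp [crun]
  | cons y t ih =>
      intro c h
      simp only [List.mem_cons, not_or] at h
      have h0 : y ≠ "0" := fun hy => h.1 hy.symm
      simp only [List.cons_append, crun, if_neg h0, ih _ h.2]
      by_cases hy : y = "1"
      · subst hy
        simp
        ring
      · simp [hy]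

theorem alt_eq_crun (col : List String) : altColRuns col = crun 0 col := by
  induction col using altColRuns.induct with
  | case1 col h =>
      rw [altColRuns.eq_def]
      split
      · rw [crun_of_not_mem col ((PySem.List.index?_eq_none_iff _ _).mp h)]
      · next z heq =>
          rw [h] at heq
          cases heq
  | case2 col z h ih =>
      obtain ⟨pre, suf, hcol, hlen, hnot⟩ := (PySem.List.index?_eq_some_iff _ _ _).mp h
      have htake : PySem.List.slice col none (some (z : Int)) = pre := by
        rw [PySem.List.slice_to_natCast, hcol, ← hlen, List.take_left]
      have hdrop : PySem.List.slice col (some ((z : Int) + 1)) none = suf := by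
        have hc : ((z : Int) + 1) = ((z + 1 : Nat) : Int) := by push_cast; ring
        rw [hc, PySem.List.slice_from_natCast, hcol]
        have h2 : pre ++ "0" :: suf = (pre ++ ["0"]) ++ suf := by simp
        rw [h2, List.drop_left' (by simp [hlen])]
      rw [hdrop] at ih
      rw [altColRuns.eq_def]
      split
      · next heq =>
          rw [h] at heq
          cases heq
      · next z' heq =>
          rw [h] at heq
          injection heq with hz
          subst hz
          rw [htake, hdrop, hcol, crun_append suf pre 0 hnot]
          simp [ih]

theorem foldl_foldl_stepO (l : List Int) (g : Int → List Int) (init : Int × Int) :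
    l.foldl (fun b w => (g w).foldl stepO b) init = (l.flatMap g).foldl stepO init := by
  induction l generalizing init with
  | nil => rfl
  | cons x t ih => simp [List.flatMap_cons, List.foldl_append, ih]

theorem online_batch (L : List Int) :
    L.foldl stepO (0, 0) = (L.foldl max 0, (L.count (L.foldl max 0) : Int)) := by
  induction L using List.reverseRecOn with
  | nil => simp
  | append_singleton L x ih =>
      have hmax : (L ++ [x]).foldl max 0 = max (L.foldl max 0) x := by
        simp [List.foldl_append]
      rw [List.foldl_append, ih, List.foldl_cons, List.foldl_nil, hmax]
      set M := L.foldl max 0 with hM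
      rcases lt_trichotomy x M with hlt | heq | hgt
      · have h1 : x ≠ M := ne_of_lt hlt
        simp [stepO, h1, not_lt.mpr (le_of_lt hlt), max_eq_left (le_of_lt hlt),
          List.count_append]
      · subst heq
        simp [stepO, List.count_append]
      · have h1 : x ≠ M := ne_of_gt hgt
        have hnot : x ∉ L := fun hx =>
          absurd ((PySem.List.le_foldl_max L 0).2 x hx) (not_le.mpr hgt)
        simp [stepO, h1, hgt, max_eq_right (le_of_lt hgt), List.count_append,
          List.count_eq_zero.mpr hnot]

-- A's whole per-column body equals the stepO-fold of that column's runs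
theorem colstep (mymatrix : List (List String)) (n w : Int) (b : Int × Int) :
    (PySem.List.pyRange 0
        ((((PySem.List.pyRange 0 n 1).foldl
            (fun (s : Int × List Int) i =>
              stepA s (PySem.List.pyGetD (PySem.List.pyGetD mymatrix i []) w "")) (0, [])).2.length : Int) ) 1).foldl
      (fun (b : Int × Int) k => stepO b (PySem.List.pyGetD
          ((PySem.List.pyRange 0 n 1).foldl
            (fun (s : Int × List Int) i =>
              stepA s (PySem.List.pyGetD (PySem.List.pyGetD mymatrix i []) w "")) (0, [])).2 k 0)) b
    = (crun 0 (colL mymatrix n w)).foldl stepO b := by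
  have hcl : ((PySem.List.pyRange 0 n 1).foldl
      (fun (s : Int × List Int) i =>
        stepA s (PySem.List.pyGetD (PySem.List.pyGetD mymatrix i []) w "")) (0, [])).2
      = crun 0 (colL mymatrix n w) := by
    rw [colL, ← List.foldl_map]
    exact foldl_stepA_snd _ 0 []
  rw [hcl, PySem.List.foldl_pyRange_zero_pyGetD']

-- ===== VERDICT (by name: the statement is the Claim_ definition above) =====
theorem width_check_spec : Claim_equal_width_check := by
  intro mymatrix n _ _
  unfold Spec_width_check width_check width_check_alt
  simp only [colstep, alt_eq_crun, colL]
  rw [foldl_foldl_stepO, PySem.List.foldl_append_eq_flatMap, online_batch]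
  simp only [List.nil_append]
  set F := (PySem.List.pyRange 0 n 1).flatMap
    (fun w => crun 0 ((PySem.List.pyRange 0 n 1).map
      (fun i => PySem.List.pyGetD (PySem.List.pyGetD mymatrix i []) w ""))) with hF
  have hnn : ∀ y ∈ F, 0 ≤ y := by
    intro y hy
    rw [hF, List.mem_flatMap] at hy
    obtain ⟨w, -, hy⟩ := hy
    exact crun_nonneg _ 0 le_rfl y hy
  cases hFc : F with
  | nil => simp [PySem.List.max?]
  | cons x t =>
      rw [PySem.List.max?_id_cons]
      have hx : 0 ≤ x := hnn x (by rw [hFc]; exact List.mem_cons_self)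
      have : (x :: t).foldl max 0 = t.foldl max x := by
        rw [List.foldl_cons, max_eq_right hx]
      simp [this]
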